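-- pv_equiv track=rewrite | github.com/tldrafael/tkinter-tagger | strong_label_pro2.py | choose_best_grid
-- ===== SOURCE A (Python) =====
-- import math
-- from typing import Dict, Iterable, List, Optional, Sequence, Tuple
--
-- def choose_best_grid(
--     n_tiles: int,
--     screen_w: int,
--     screen_h: int,
--     reserved_h: int,
--     margin: int = 16,
--     gap: int = 8,
--     max_cols: Optional[int] = None,
-- ) -> Tuple[int, int, int]:
--     """
--     Search the number of columns (1..max) that yields the largest square tile size
--     given available space.
--
--     Returns (cols, rows, tile_size).
--     """
--     avail_w = max(100, screen_w - 2 * margin)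
--     avail_h = max(100, screen_h - reserved_h - 2 * margin)
--     if max_cols is None:
--         max_cols = n_tiles
--
--     best_cols, best_rows, best_tile = 1, n_tiles, 0
--     for cols in range(1, max_cols + 1):
--         rows = math.ceil(n_tiles / cols)
--         tile_w = (avail_w - gap * (cols - 1)) // cols
--         tile_h = (avail_h - gap * (rows - 1)) // rows
--         tile = int(min(tile_w, tile_h))
--         if tile > best_tile:
--             best_cols, best_rows, best_tile = cols, rows, tile
--
--     return best_cols, best_rows, best_tile
-- ===== SOURCE B (Python) =====
-- def choose_best_grid(
--     n_tiles,
--     screen_w,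
--     screen_h,
--     reserved_h,
--     margin=16,
--     gap=8,
--     max_cols=None,
-- ):
--     """
--     Same result as the linear scan, but jumps over blocks of column counts that
--     share the same row count ceil(n_tiles/cols): within such a block the tile
--     height is constant and the tile width is largest at the block's first column,
--     so only block-start column counts can improve the best square tile.
--     O(sqrt(n_tiles)) candidate columns instead of O(n_tiles).
--
--     Returns (cols, rows, tile_size).
--     """
--     avail_w = max(100, screen_w - 2 * margin)
--     avail_h = max(100, screen_h - reserved_h - 2 * margin)
--     m = n_tiles if max_cols is None else max_cols
--
--     best_cols, best_rows, best_tile = 1, n_tiles, 0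
--     c = 1
--     while c <= m:
--         rows = -((-n_tiles) // c)  # ceil(n_tiles / c)
--         tile_w = (avail_w - gap * (c - 1)) // c
--         tile_h = (avail_h - gap * (rows - 1)) // rows
--         tile = min(tile_w, tile_h)
--         if tile > best_tile:
--             best_cols, best_rows, best_tile = c, rows, tile
--         if rows <= 1:
--             break  # every larger cols keeps rows = 1 with a narrower tile
--         # jump to the first cols with a smaller row count (and always advance)
--         c = max(c + 1, (n_tiles - 1) // (rows - 1) + 1)
--     return best_cols, best_rows, best_tile
-- ===== Notes on version B (the rewrite author's own statement) =====
-- stated objective: faster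
-- what changed: replaces A's linear scan over every column count 1..max_cols with divisor-block enumeration: all column counts sharing the same row count ceil(n_tiles/cols) are skipped in one jump, testing only each block's first column, where the tile is largest
-- outside the precondition, e.g. on choose_best_grid(17, 769, 2385, -82, 24, -760, None): A returns (13, 2, 757), B returns (17, 1, 757)
import Mathlib
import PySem

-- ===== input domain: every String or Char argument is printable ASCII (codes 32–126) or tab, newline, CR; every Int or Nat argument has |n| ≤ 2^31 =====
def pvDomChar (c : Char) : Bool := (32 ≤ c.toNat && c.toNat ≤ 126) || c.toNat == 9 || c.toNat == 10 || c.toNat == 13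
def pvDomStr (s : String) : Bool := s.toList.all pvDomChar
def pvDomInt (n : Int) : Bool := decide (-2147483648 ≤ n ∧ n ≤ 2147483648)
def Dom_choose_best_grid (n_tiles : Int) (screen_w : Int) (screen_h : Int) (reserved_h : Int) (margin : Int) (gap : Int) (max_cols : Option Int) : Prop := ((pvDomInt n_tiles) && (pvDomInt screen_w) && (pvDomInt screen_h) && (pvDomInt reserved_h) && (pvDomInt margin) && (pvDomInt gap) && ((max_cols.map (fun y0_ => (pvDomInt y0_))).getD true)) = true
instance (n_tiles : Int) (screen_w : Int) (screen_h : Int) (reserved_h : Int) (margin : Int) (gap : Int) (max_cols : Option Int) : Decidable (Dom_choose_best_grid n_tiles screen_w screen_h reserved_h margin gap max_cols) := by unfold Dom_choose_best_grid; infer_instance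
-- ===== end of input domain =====

-- B replaces A's linear scan over every column count by divisor-block jumps (only the first
-- column of each equal-row-count block is tested); return value only, no side effects.

-- ===== PORT A =====
def choose_best_grid (n_tiles : Int) (screen_w : Int) (screen_h : Int) (reserved_h : Int) (margin : Int) (gap : Int) (max_cols : Option Int) : List Int :=
  let avail_w := max 100 (screen_w - 2 * margin)
  let avail_h := max 100 (screen_h - reserved_h - 2 * margin)
  let m := max_cols.getD n_tiles
  let r := (PySem.List.pyRange 1 (m + 1)).foldl
    (fun (st : Int × Int × Int) cols =>
      -- math.ceil(n_tiles / cols): exact as -((-n_tiles) // cols) on Dom, where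
      -- |n_tiles| ≤ 2^31 < 2^53 keeps the float quotient from rounding across an integer
      let rows := -(PySem.Int.floordiv (-n_tiles) cols)
      let tile_w := PySem.Int.floordiv (avail_w - gap * (cols - 1)) cols
      let tile_h := PySem.Int.floordiv (avail_h - gap * (rows - 1)) rows
      let tile := min tile_w tile_h
      if tile > st.2.2 then (cols, rows, tile) else st)
    (1, n_tiles, 0)
  [r.1, r.2.1, r.2.2]

-- ===== PORT B =====
-- the while loop of Source B: evaluate cols = c, then jump to the first cols of the next block
def altGo (n_tiles W H gap m : Int) (c : Int) (best : Int × Int × Int) : Int × Int × Int :=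
  if hcm : c ≤ m then
    let rows := -(PySem.Int.floordiv (-n_tiles) c)  -- ceil(n_tiles / c), as in Source B
    let tile_w := PySem.Int.floordiv (W - gap * (c - 1)) c
    let tile_h := PySem.Int.floordiv (H - gap * (rows - 1)) rows
    let tile := min tile_w tile_h
    let best' := if tile > best.2.2 then (c, rows, tile) else best
    if rows ≤ 1 then best'
    else altGo n_tiles W H gap m (max (c + 1) (PySem.Int.floordiv (n_tiles - 1) (rows - 1) + 1)) best'
  else best
termination_by (m + 1 - c).toNat
decreasing_by omega

def choose_best_grid_alt (n_tiles : Int) (screen_w : Int) (screen_h : Int) (reserved_h : Int) (margin : Int) (gap : Int) (max_cols : Option Int) : List Int :=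
  let avail_w := max 100 (screen_w - 2 * margin)
  let avail_h := max 100 (screen_h - reserved_h - 2 * margin)
  let m := max_cols.getD n_tiles
  let r := altGo n_tiles avail_w avail_h gap m 1 (1, n_tiles, 0)
  [r.1, r.2.1, r.2.2]

-- ===== PRECONDITION & SPEC =====
-- Pre_ excludes negative gap (outside the pixel-geometry domain: tile width is then not
-- monotone in the column count, so A's full scan and B's block scan legitimately pick
-- different best grids) and the non-positive n_tiles inputs whose column range reaches a
-- zero row count, on which A raises ZeroDivisionError.
def Pre_choose_best_grid (n_tiles : Int) (screen_w : Int) (screen_h : Int) (reserved_h : Int) (margin : Int) (gap : Int) (max_cols : Option Int) : Prop :=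
  0 ≤ gap ∧ (1 ≤ n_tiles ∨ max_cols.getD n_tiles ≤ -n_tiles)
instance (n_tiles : Int) (screen_w : Int) (screen_h : Int) (reserved_h : Int) (margin : Int) (gap : Int) (max_cols : Option Int) : Decidable (Pre_choose_best_grid n_tiles screen_w screen_h reserved_h margin gap max_cols) := by unfold Pre_choose_best_grid; infer_instance

def pvWitness_choose_best_grid : Int × Int × Int × Int × Int × Int × Option Int := (12, 1280, 800, 120, 16, 8, none)

def Spec_choose_best_grid (n_tiles : Int) (screen_w : Int) (screen_h : Int) (reserved_h : Int) (margin : Int) (gap : Int) (max_cols : Option Int) (out : List Int) : Prop := out = choose_best_grid_alt n_tiles screen_w screen_h reserved_h margin gap max_cols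
instance (n_tiles : Int) (screen_w : Int) (screen_h : Int) (reserved_h : Int) (margin : Int) (gap : Int) (max_cols : Option Int) (out : List Int) : Decidable (Spec_choose_best_grid n_tiles screen_w screen_h reserved_h margin gap max_cols out) := by unfold Spec_choose_best_grid; infer_instance

-- ===== CLAIM (what is proved, stated in full; the proofs are below) =====
def Claim_equal_choose_best_grid : Prop := ∀ (n_tiles : Int) (screen_w : Int) (screen_h : Int) (reserved_h : Int) (margin : Int) (gap : Int) (max_cols : Option Int), Dom_choose_best_grid n_tiles screen_w screen_h reserved_h margin gap max_cols → Pre_choose_best_grid n_tiles screen_w screen_h reserved_h margin gap max_cols → Spec_choose_best_grid n_tiles screen_w screen_h reserved_h margin gap max_cols (choose_best_grid n_tiles screen_w screen_h reserved_h margin gap max_cols)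

-- ===== LEMMAS AND PROOFS =====

-- proof-only abbreviations for the quantities both loops compute at a column count c
def pvRows (n c : Int) : Int := -(PySem.Int.floordiv (-n) c)
def pvTile (W H g n c : Int) : Int :=
  min (PySem.Int.floordiv (W - g * (c - 1)) c)
      (PySem.Int.floordiv (H - g * (pvRows n c - 1)) (pvRows n c))
def pvStep (W H g n : Int) (st : Int × Int × Int) (c : Int) : Int × Int × Int :=
  if pvTile W H g n c > st.2.2 then (c, pvRows n c, pvTile W H g n c) else st

lemma choose_best_grid_as_fold (n_tiles screen_w screen_h reserved_h margin gap : Int) (max_cols : Option Int) :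
    choose_best_grid n_tiles screen_w screen_h reserved_h margin gap max_cols =
      (let r := (PySem.List.pyRange 1 (max_cols.getD n_tiles + 1)).foldl
          (pvStep (max 100 (screen_w - 2 * margin)) (max 100 (screen_h - reserved_h - 2 * margin)) gap n_tiles)
          (1, n_tiles, 0);
       [r.1, r.2.1, r.2.2]) := rfl

lemma altGo_eq (n W H g m c : Int) (st : Int × Int × Int) :
    altGo n W H g m c st =
      if c ≤ m then
        (if pvRows n c ≤ 1 then pvStep W H g n st c
         else altGo n W H g m (max (c + 1) (PySem.Int.floordiv (n - 1) (pvRows n c - 1) + 1)) (pvStep W H g n st c))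
      else st := by
  rw [altGo]
  by_cases h : c ≤ m
  · rw [dif_pos h, if_pos h]; rfl
  · rw [dif_neg h, if_neg h]

lemma pv_rows_le_iff (n c q : Int) (hc : 0 < c) : pvRows n c ≤ q ↔ n ≤ q * c := by
  unfold pvRows
  rw [show (-(PySem.Int.floordiv (-n) c) ≤ q) ↔ (-q ≤ PySem.Int.floordiv (-n) c) by omega,
      PySem.Int.le_floordiv_iff_mul_le hc, neg_mul]
  omega

lemma pv_le_rows_iff (n c q : Int) (hc : 0 < c) : q ≤ pvRows n c ↔ (q - 1) * c < n := by
  unfold pvRows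
  rw [show (q ≤ -(PySem.Int.floordiv (-n) c)) ↔ (PySem.Int.floordiv (-n) c < -q + 1) by omega,
      PySem.Int.floordiv_lt_iff_lt_mul hc,
      show (-q + 1) * c = -((q - 1) * c) by ring]
  omega

lemma pv_rows_pos (n c : Int) (hn : 1 ≤ n) (hc : 0 < c) : 1 ≤ pvRows n c := by
  rw [pv_le_rows_iff n c 1 hc]; simpa using hn

lemma pv_rows_antitone (n c c' : Int) (hn : 1 ≤ n) (hc : 0 < c) (hcc : c ≤ c') :
    pvRows n c' ≤ pvRows n c := by
  have hc' : 0 < c' := lt_of_lt_of_le hc hcc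
  rw [pv_rows_le_iff n c' _ hc']
  have h1 : n ≤ pvRows n c * c := (pv_rows_le_iff n c _ hc).1 le_rfl
  have h2 : (0:Int) ≤ pvRows n c := by have := pv_rows_pos n c hn hc; omega
  calc n ≤ pvRows n c * c := h1
    _ ≤ pvRows n c * c' := mul_le_mul_of_nonneg_left hcc h2

lemma pv_blockend_ge (n c : Int) (hc : 0 < c) (hr : 2 ≤ pvRows n c) :
    c ≤ PySem.Int.floordiv (n - 1) (pvRows n c - 1) := by
  rw [PySem.Int.le_floordiv_iff_mul_le (by omega : (0:Int) < pvRows n c - 1)]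
  have h1 : (pvRows n c - 1) * c < n := (pv_le_rows_iff n c _ hc).1 le_rfl
  have : c * (pvRows n c - 1) = (pvRows n c - 1) * c := mul_comm _ _
  omega

lemma pv_rows_eq_on_block (n c c' : Int) (hn : 1 ≤ n) (hc : 0 < c)
    (hr : 2 ≤ pvRows n c) (hcc : c ≤ c')
    (hce : c' ≤ PySem.Int.floordiv (n - 1) (pvRows n c - 1)) :
    pvRows n c' = pvRows n c := by
  have hc' : 0 < c' := lt_of_lt_of_le hc hcc
  refine le_antisymm (pv_rows_antitone n c c' hn hc hcc) ?_
  rw [pv_le_rows_iff n c' _ hc']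
  have h1 : PySem.Int.floordiv (n - 1) (pvRows n c - 1) * (pvRows n c - 1) ≤ n - 1 :=
    (PySem.Int.le_floordiv_iff_mul_le (by omega : (0:Int) < pvRows n c - 1)).1 le_rfl
  have h2 : c' * (pvRows n c - 1) ≤ PySem.Int.floordiv (n - 1) (pvRows n c - 1) * (pvRows n c - 1) :=
    mul_le_mul_of_nonneg_right hce (by omega)
  have : (pvRows n c - 1) * c' = c' * (pvRows n c - 1) := mul_comm _ _
  omega

lemma pv_tw_antitone (W g c c' : Int) (hW : 100 ≤ W) (hg : 0 ≤ g) (hc : 0 < c) (hcc : c ≤ c') :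
    PySem.Int.floordiv (W - g * (c' - 1)) c' ≤ PySem.Int.floordiv (W - g * (c - 1)) c := by
  have hc' : 0 < c' := lt_of_lt_of_le hc hcc
  rw [PySem.Int.floordiv_eq_ediv_of_pos hc, PySem.Int.floordiv_eq_ediv_of_pos hc',
      show W - g * (c - 1) = (W + g) + (-g) * c by ring,
      show W - g * (c' - 1) = (W + g) + (-g) * c' by ring,
      Int.add_mul_ediv_right _ _ (ne_of_gt hc), Int.add_mul_ediv_right _ _ (ne_of_gt hc')]
  have h0 : (0:Int) ≤ (W + g) / c' := Int.ediv_nonneg (by omega) (le_of_lt hc')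
  have h1 : (W + g) / c' * c' ≤ W + g := by
    have hmod := Int.emod_nonneg (W + g) (ne_of_gt hc')
    have hdm := Int.ediv_add_emod (W + g) c'
    have hcm : (W + g) / c' * c' = c' * ((W + g) / c') := mul_comm _ _
    omega
  have h2 : (W + g) / c' * c ≤ (W + g) / c' * c' := mul_le_mul_of_nonneg_left hcc h0
  have h3 : (W + g) / c' ≤ (W + g) / c := by
    rw [Int.le_ediv_iff_mul_le hc]; omega
  omega

lemma pv_tile_le (W H g n c c' : Int) (hW : 100 ≤ W) (hg : 0 ≤ g) (hc : 0 < c) (hcc : c ≤ c')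
    (hrows : pvRows n c' = pvRows n c) : pvTile W H g n c' ≤ pvTile W H g n c := by
  unfold pvTile
  rw [hrows]
  exact min_le_min (pv_tw_antitone W g c c' hW hg hc hcc) le_rfl

lemma pv_step_le (W H g n : Int) (st : Int × Int × Int) (c : Int) :
    pvTile W H g n c ≤ (pvStep W H g n st c).2.2 := by
  unfold pvStep
  split
  · simp
  · next h => simpa using not_lt.mp h

lemma pv_step_eq_of_le (W H g n : Int) (st : Int × Int × Int) (c : Int)
    (h : pvTile W H g n c ≤ st.2.2) : pvStep W H g n st c = st := by
  unfold pvStep; exact if_neg (not_lt.mpr h)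

lemma pv_foldl_no_update (W H g n : Int) (l : List Int) (st : Int × Int × Int)
    (h : ∀ x ∈ l, pvTile W H g n x ≤ st.2.2) : l.foldl (pvStep W H g n) st = st := by
  induction l with
  | nil => rfl
  | cons a l ih =>
    rw [List.foldl_cons, pv_step_eq_of_le W H g n st a (h a (List.mem_cons_self))]
    exact ih (fun x hx => h x (List.mem_cons_of_mem _ hx))

lemma pv_main (n W H g m : Int) (hn : 1 ≤ n) (hW : 100 ≤ W) (hg : 0 ≤ g) :
    ∀ (k : Nat) (c : Int) (st : Int × Int × Int), (m + 1 - c).toNat ≤ k → 1 ≤ c →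
      (PySem.List.pyRange c (m + 1)).foldl (pvStep W H g n) st = altGo n W H g m c st := by
  intro k
  induction k with
  | zero =>
    intro c st hk hc
    have hcm : ¬ c ≤ m := by omega
    rw [PySem.List.pyRange_one_eq_nil (by omega), altGo_eq, if_neg hcm]
    rfl
  | succ k ih =>
    intro c st hk hc
    by_cases hcm : c ≤ m
    · rw [PySem.List.pyRange_one_cons (by omega : c < m + 1), List.foldl_cons, altGo_eq, if_pos hcm]
      have hstep := pv_step_le W H g n st c
      by_cases hr : pvRows n c ≤ 1
      · rw [if_pos hr]
        apply pv_foldl_no_update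
        intro x hx
        obtain ⟨hx1, hx2⟩ := PySem.List.mem_pyRange_one.1 hx
        have hrx : pvRows n x = pvRows n c := by
          have h1 := pv_rows_antitone n c x hn (by omega) (by omega)
          have h2 := pv_rows_pos n x hn (by omega)
          have h3 := pv_rows_pos n c hn (by omega)
          omega
        exact le_trans (pv_tile_le W H g n c x hW hg (by omega) (by omega) hrx) hstep
      · rw [if_neg hr]
        have hr2 : 2 ≤ pvRows n c := by
          have := pv_rows_pos n c hn (by omega); omega
        set fd := PySem.Int.floordiv (n - 1) (pvRows n c - 1) with hfd
        have hbe : c ≤ fd := pv_blockend_ge n c (by omega) hr2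
        have hnext : max (c + 1) (fd + 1) = fd + 1 := max_eq_right (by omega)
        rw [hnext]
        have hsplit : PySem.List.pyRange (c + 1) (m + 1) =
            PySem.List.pyRange (c + 1) (min (fd + 1) (m + 1)) ++
              PySem.List.pyRange (min (fd + 1) (m + 1)) (m + 1) :=
          PySem.List.pyRange_one_append _ _ _ (by omega) (by omega)
        rw [hsplit, List.foldl_append]
        have hmid : (PySem.List.pyRange (c + 1) (min (fd + 1) (m + 1))).foldl
            (pvStep W H g n) (pvStep W H g n st c) = pvStep W H g n st c := by
          apply pv_foldl_no_update
          intro x hx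
          obtain ⟨hx1, hx2⟩ := PySem.List.mem_pyRange_one.1 hx
          have hrx : pvRows n x = pvRows n c :=
            pv_rows_eq_on_block n c x hn (by omega) hr2 (by omega) (by omega)
          exact le_trans (pv_tile_le W H g n c x hW hg (by omega) (by omega) hrx) hstep
        rw [hmid]
        by_cases hend : fd + 1 ≤ m + 1
        · rw [min_eq_left hend]
          exact ih (fd + 1) (pvStep W H g n st c) (by omega) (by omega)
        · rw [min_eq_right (by omega), PySem.List.pyRange_one_eq_nil (by omega)]
          rw [altGo_eq, if_neg (by omega : ¬ fd + 1 ≤ m)]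
          rfl
    · rw [PySem.List.pyRange_one_eq_nil (by omega), altGo_eq, if_neg hcm]
      rfl

-- every column count in range yields a non-positive tile when n ≤ 0 and the range stays below a zero row count
lemma pv_tile_nonpos (n W H g c : Int) (hn : n ≤ 0) (hc : 1 ≤ c) (hcn : c ≤ -n)
    (hH : 100 ≤ H) (hg : 0 ≤ g) : pvTile W H g n c ≤ 0 := by
  have hrow : pvRows n c ≤ -1 := by
    rw [pv_rows_le_iff n c _ (by omega)]
    omega
  have hnum : 100 ≤ H - g * (pvRows n c - 1) := by
    have : g * (pvRows n c - 1) ≤ 0 := mul_nonpos_of_nonneg_of_nonpos hg (by omega)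
    omega
  have hth : PySem.Int.floordiv (H - g * (pvRows n c - 1)) (pvRows n c) ≤ 0 := by
    have hdm := PySem.Int.floordiv_mul_add_mod (H - g * (pvRows n c - 1)) (pvRows n c)
    have hmb := PySem.Int.mod_neg_bounds (H - g * (pvRows n c - 1)) (by omega : pvRows n c < 0)
    by_contra hpos
    push_neg at hpos
    have : PySem.Int.floordiv (H - g * (pvRows n c - 1)) (pvRows n c) * pvRows n c ≤ -1 := by
      have := mul_le_mul_of_nonneg_left (show pvRows n c ≤ -1 from hrow)
        (show (0:Int) ≤ PySem.Int.floordiv (H - g * (pvRows n c - 1)) (pvRows n c) by omega)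
      nlinarith
    omega
  exact le_trans (min_le_right _ _) hth

lemma pv_neg_case (n W H g m : Int) (hn : n ≤ 0) (hm : m ≤ -n) (hH : 100 ≤ H) (hg : 0 ≤ g) :
    (PySem.List.pyRange 1 (m + 1)).foldl (pvStep W H g n) (1, n, 0) = (1, n, 0) ∧
      altGo n W H g m 1 (1, n, 0) = (1, n, 0) := by
  constructor
  · apply pv_foldl_no_update
    intro x hx
    obtain ⟨hx1, hx2⟩ := PySem.List.mem_pyRange_one.1 hx
    exact pv_tile_nonpos n W H g x hn hx1 (by omega) hH hg
  · rw [altGo_eq]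
    by_cases h1 : (1:Int) ≤ m
    · rw [if_pos h1]
      have ht : pvTile W H g n 1 ≤ ((1:Int), n, (0:Int)).2.2 :=
        pv_tile_nonpos n W H g 1 hn le_rfl (by omega) hH hg
      have hrow : pvRows n 1 ≤ 1 := by
        have : pvRows n 1 ≤ -1 := by rw [pv_rows_le_iff n 1 _ (by omega)]; omega
        omega
      rw [if_pos hrow, pv_step_eq_of_le W H g n _ 1 ht]
    · rw [if_neg h1]

-- ===== VERDICT (by name: the statement is the Claim_ definition above) =====
theorem choose_best_grid_spec : Claim_equal_choose_best_grid := by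
  intro n_tiles screen_w screen_h reserved_h margin gap max_cols _hdom hpre
  obtain ⟨hg, hnm⟩ := hpre
  show choose_best_grid n_tiles screen_w screen_h reserved_h margin gap max_cols =
    choose_best_grid_alt n_tiles screen_w screen_h reserved_h margin gap max_cols
  rw [choose_best_grid_as_fold]
  simp only [choose_best_grid_alt]
  have hW : (100:Int) ≤ max 100 (screen_w - 2 * margin) := le_max_left _ _
  have hH : (100:Int) ≤ max 100 (screen_h - reserved_h - 2 * margin) := le_max_left _ _
  have hfold : (PySem.List.pyRange 1 (max_cols.getD n_tiles + 1)).foldl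
      (pvStep (max 100 (screen_w - 2 * margin)) (max 100 (screen_h - reserved_h - 2 * margin)) gap n_tiles)
      (1, n_tiles, 0) =
      altGo n_tiles (max 100 (screen_w - 2 * margin)) (max 100 (screen_h - reserved_h - 2 * margin)) gap
        (max_cols.getD n_tiles) 1 (1, n_tiles, 0) := by
    by_cases hn : 1 ≤ n_tiles
    · exact pv_main n_tiles _ _ gap (max_cols.getD n_tiles) hn hW hg
        ((max_cols.getD n_tiles + 1 - 1).toNat) 1 (1, n_tiles, 0) le_rfl le_rfl
    · have hm : max_cols.getD n_tiles ≤ -n_tiles := by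
        rcases hnm with h | h
        · omega
        · exact h
      obtain ⟨h1, h2⟩ := pv_neg_case n_tiles _ _ gap (max_cols.getD n_tiles) (by omega) hm hH hg
      rw [h1, h2]
  rw [hfold]
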